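-- pv_equiv track=rewrite | github.com/ogurdima/interviewbit | 01 - Arrays/Max Distance/maxdist.py | maximumGapBF
-- ===== SOURCE A (Python) =====
-- def maximumGapBF(A):
--     cmax = -1
--     for i in range(0, len(A)):
--         s = i + cmax
--         if cmax == -1:
--             s += 1
--         for j in range(s, len(A)):
--             if A[j] >= A[i]:
--                 cmax = max(cmax, j-i)
--
--     return cmax
-- ===== SOURCE B (Python) =====
-- def maximumGapBF(A):
--     # Scan candidate distances from largest to smallest; the first distance
--     # that admits a valid pair is the answer (distance 0 always works when
--     # the list is nonempty).
--     n = len(A)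
--     if n == 0:
--         return -1
--     for d in range(n - 1, 0, -1):
--         for i in range(n - d):
--             if A[i] <= A[i + d]:
--                 return d
--     return 0
-- ===== Notes on version B (the rewrite author's own statement) =====
-- stated objective: alternative
-- what changed: B replaces A's pruned forward double loop with accumulator by a countdown over candidate distances (largest first) that returns the first distance admitting a pair A[i] <= A[i+d], with early exit and no running maximum.
import Mathlib
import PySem

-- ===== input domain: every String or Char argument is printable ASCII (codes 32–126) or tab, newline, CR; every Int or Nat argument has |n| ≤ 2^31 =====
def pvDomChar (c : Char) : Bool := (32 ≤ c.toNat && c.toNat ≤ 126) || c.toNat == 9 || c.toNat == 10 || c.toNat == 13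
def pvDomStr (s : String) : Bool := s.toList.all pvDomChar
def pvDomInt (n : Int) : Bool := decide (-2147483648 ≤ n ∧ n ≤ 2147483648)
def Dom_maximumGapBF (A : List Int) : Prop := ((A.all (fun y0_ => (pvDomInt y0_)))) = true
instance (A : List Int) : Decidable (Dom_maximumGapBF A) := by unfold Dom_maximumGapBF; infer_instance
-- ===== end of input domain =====

-- B replaces A's pruned double loop with a largest-first countdown over candidate
-- distances that returns at the first distance admitting a pair (alternative algorithm,
-- similar worst-case cost); proved to return the same value on every input.


-- ===== PORT A =====
-- literal transliteration of A: outer loop over i, inner loop over j starting at the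
-- pruned index s, running maximum cmax (initially -1).
def maximumGapBF (A : List Int) : Int :=
  (PySem.List.pyRange 0 (A.length : Int) 1).foldl
    (fun cmax i =>
      let s : Int := i + cmax
      let s : Int := if cmax = -1 then s + 1 else s
      (PySem.List.pyRange s (A.length : Int) 1).foldl
        (fun c j =>
          if PySem.List.pyGetD A i 0 ≤ PySem.List.pyGetD A j 0 then max c (j - i) else c)
        cmax)
    (-1)

-- ===== PORT B =====
-- inner 'for i in range(n - d): if A[i] <= A[i + d]: return d' of Source B
def bHit (A : List Int) (d : Int) : Bool :=
  (PySem.List.pyRange 0 ((A.length : Int) - d) 1).any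
    (fun i => PySem.List.pyGetD A i 0 ≤ PySem.List.pyGetD A (i + d) 0)

-- 'for d in range(n - 1, 0, -1): …; return 0' with early return
def bScan (A : List Int) (ds : List Int) : Int :=
  match ds with
  | [] => 0
  | d :: rest => if bHit A d then d else bScan A rest

def maximumGapBF_alt (A : List Int) : Int :=
  if (A.length : Int) = 0 then -1
  else bScan A (PySem.List.pyRange ((A.length : Int) - 1) 0 (-1))

-- ===== PRECONDITION & SPEC =====
def Spec_maximumGapBF (A : List Int) (out : Int) : Prop := out = maximumGapBF_alt A
instance (A : List Int) (out : Int) : Decidable (Spec_maximumGapBF A out) := by unfold Spec_maximumGapBF; infer_instance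

-- ===== CLAIM (what is proved, stated in full; the proofs are below) =====
def Claim_equal_maximumGapBF : Prop := ∀ (A : List Int), Dom_maximumGapBF A → Spec_maximumGapBF A (maximumGapBF A)

-- ===== LEMMAS AND PROOFS =====

-- Boolean "some pair at distance d exists" and the greatest such distance.
def pHit (A : List Int) (d : Nat) : Bool :=
  decide (∃ i < A.length, i + d < A.length ∧ A.getD i 0 ≤ A.getD (i + d) 0)

def gMax (A : List Int) : Nat := Nat.findGreatest (fun d => pHit A d = true) (A.length - 1)

-- the inner-loop body of A's port, named for the proofs
def stepA (A : List Int) (i : Int) (c j : Int) : Int :=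
  if PySem.List.pyGetD A i 0 ≤ PySem.List.pyGetD A j 0 then max c (j - i) else c

lemma stepA_le (A : List Int) (i c j : Int) : c ≤ stepA A i c j := by
  unfold stepA; split <;> simp

lemma inner_ge_init (A : List Int) (i : Int) (L : List Int) (c0 : Int) :
    c0 ≤ L.foldl (stepA A i) c0 := by
  induction L generalizing c0 with
  | nil => simp
  | cons a L ih => exact le_trans (stepA_le A i c0 a) (ih _)

lemma inner_ge_mem (A : List Int) (i : Int) (L : List Int) (c0 j : Int)
    (hj : j ∈ L) (hc : PySem.List.pyGetD A i 0 ≤ PySem.List.pyGetD A j 0) :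
    j - i ≤ L.foldl (stepA A i) c0 := by
  induction L generalizing c0 with
  | nil => cases hj
  | cons a L ih =>
    rcases List.mem_cons.mp hj with rfl | hmem
    · refine le_trans ?_ (inner_ge_init A i L _)
      simp [stepA, hc]
    · exact ih _ hmem

lemma inner_cases (A : List Int) (i : Int) (L : List Int) (c0 : Int) :
    L.foldl (stepA A i) c0 = c0 ∨
      ∃ j ∈ L, PySem.List.pyGetD A i 0 ≤ PySem.List.pyGetD A j 0 ∧
        L.foldl (stepA A i) c0 = j - i := by
  induction L generalizing c0 with
  | nil => left; rfl
  | cons a L ih =>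
    rcases ih (stepA A i c0 a) with h | ⟨j, hj, hcond, heq⟩
    · by_cases hc : PySem.List.pyGetD A i 0 ≤ PySem.List.pyGetD A a 0
      · rcases max_cases c0 (a - i) with ⟨hm, _⟩ | ⟨hm, _⟩
        · left; simp only [List.foldl_cons, stepA, if_pos hc] at h ⊢; rw [h, hm]
        · right; exact ⟨a, by simp, hc, by simp only [List.foldl_cons, stepA, if_pos hc] at h ⊢; rw [h, hm]⟩
      · left; simp only [List.foldl_cons, stepA, if_neg hc] at h ⊢; exact h
    · right; exact ⟨j, by simp [hj], hcond, heq⟩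

-- invariant after processing the first k outer indices
def InvA (A : List Int) (k : Nat) (c : Int) : Prop :=
  (-1 ≤ c) ∧
  (c = -1 ∨ ∃ i d : Nat, i < k ∧ i + d < A.length ∧ A.getD i 0 ≤ A.getD (i + d) 0 ∧ c = d) ∧
  (∀ i d : Nat, i < k → i + d < A.length → A.getD i 0 ≤ A.getD (i + d) 0 → (d : Int) ≤ c)

lemma invA_step (A : List Int) (k : Nat) (c : Int) (hInv : InvA A k c) :
    InvA A (k + 1)
      ((PySem.List.pyRange (if c = -1 then (k : Int) + c + 1 else (k : Int) + c) (A.length : Int) 1).foldl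
        (stepA A (k : Int)) c) := by
  obtain ⟨hge, hach, hbd⟩ := hInv
  set s : Int := if c = -1 then (k : Int) + c + 1 else (k : Int) + c with hs
  have hsk : (k : Int) ≤ s := by
    rcases eq_or_ne c (-1) with h | h
    · simp [hs, h]
    · rw [hs, if_neg h]; omega
  have hinit : c ≤ (PySem.List.pyRange s (A.length : Int) 1).foldl (stepA A (k : Int)) c :=
    inner_ge_init A (k : Int) _ c
  refine ⟨le_trans hge hinit, ?_, ?_⟩
  · rcases inner_cases A (k : Int) (PySem.List.pyRange s (A.length : Int) 1) c with hr | ⟨j, hj, hcond, hr⟩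
    · rw [hr]
      rcases hach with h | ⟨i, d, hik, hlt, hle, he⟩
      · left; exact h
      · right; exact ⟨i, d, by omega, hlt, hle, he⟩
    · right
      obtain ⟨hj1, hj2⟩ := PySem.List.mem_pyRange_one.mp hj
      have hjk : (k : Int) ≤ j := le_trans hsk hj1
      refine ⟨k, (j - (k : Int)).toNat, by omega, by omega, ?_, ?_⟩
      · have h1 : PySem.List.pyGetD A ((k : Nat) : Int) 0 = A.getD k 0 :=
          PySem.List.pyGetD_natCast A k 0
        have h2 : PySem.List.pyGetD A j 0 = A.getD (k + (j - (k : Int)).toNat) 0 := by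
          rw [← PySem.List.pyGetD_natCast A (k + (j - (k : Int)).toNat) 0]
          congr 1; push_cast; omega
        rwa [h1, h2] at hcond
      · rw [hr]; omega
  · intro i d hik hlt hle
    rcases Nat.lt_succ_iff_lt_or_eq.mp hik with h | rfl
    · exact le_trans (hbd i d h hlt hle) hinit
    · by_cases hjs : s ≤ ((i + d : Nat) : Int)
      · have hmem : ((i + d : Nat) : Int) ∈ PySem.List.pyRange s (A.length : Int) 1 :=
          PySem.List.mem_pyRange_one.mpr ⟨hjs, by exact_mod_cast hlt⟩
        have hcond : PySem.List.pyGetD A ((i : Nat) : Int) 0 ≤ PySem.List.pyGetD A ((i + d : Nat) : Int) 0 := by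
          rw [PySem.List.pyGetD_natCast, PySem.List.pyGetD_natCast]; exact hle
        have hres := inner_ge_mem A ((i : Nat) : Int) (PySem.List.pyRange s (A.length : Int) 1)
          c ((i + d : Nat) : Int) hmem hcond
        have hd : ((i + d : Nat) : Int) - ((i : Nat) : Int) = (d : Int) := by push_cast; ring
        rwa [hd] at hres
      · rcases eq_or_ne c (-1) with hc | hc
        · exfalso; rw [hs, if_pos hc, hc] at hjs; push_cast at hjs; omega
        · rw [hs, if_neg hc] at hjs; push_cast at hjs; omega

lemma maximumGapBF_invA (A : List Int) : InvA A A.length (maximumGapBF A) := by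
  have h : ∀ m : Nat,
      InvA A m ((PySem.List.pyRange 0 (m : Int) 1).foldl
        (fun cmax i =>
          let s : Int := i + cmax
          let s : Int := if cmax = -1 then s + 1 else s
          (PySem.List.pyRange s (A.length : Int) 1).foldl
            (fun c j =>
              if PySem.List.pyGetD A i 0 ≤ PySem.List.pyGetD A j 0 then max c (j - i) else c)
            cmax)
        (-1)) := by
    intro m
    induction m with
    | zero =>
      rw [PySem.List.pyRange_one_eq_nil (by omega)]
      simp only [List.foldl_nil]
      exact ⟨by omega, Or.inl rfl, by intro i d h _ _; omega⟩
    | succ m ih =>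
      rw [show ((m + 1 : Nat) : Int) = (m : Int) + 1 by push_cast; ring,
        PySem.List.pyRange_one_succ_right (by positivity), List.foldl_append]
      exact invA_step A m _ ih
  exact h A.length

lemma maximumGapBF_eq_gMax (A : List Int) :
    maximumGapBF A = if A.length = 0 then -1 else (gMax A : Int) := by
  by_cases h0 : A.length = 0
  · unfold maximumGapBF
    rw [show ((A.length : Int)) = 0 by exact_mod_cast h0,
      PySem.List.pyRange_one_eq_nil (by omega)]
    simp [h0]
  · obtain ⟨hge, hach, hbd⟩ := maximumGapBF_invA A
    have hn : 0 < A.length := Nat.pos_of_ne_zero h0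
    have hr0 : (0 : Int) ≤ maximumGapBF A := by
      have := hbd 0 0 hn (by omega) (le_refl _)
      simpa using this
    rcases hach with h | ⟨i, d, hik, hlt, hle, he⟩
    · omega
    · rw [if_neg h0]
      have hpd : pHit A d = true := by
        unfold pHit; exact decide_eq_true ⟨i, by omega, hlt, hle⟩
      have hdle : d ≤ gMax A := Nat.le_findGreatest (by omega) hpd
      have hp0 : pHit A 0 = true := by
        unfold pHit; exact decide_eq_true ⟨0, hn, by omega, le_refl _⟩
      have hg : pHit A (gMax A) = true := by
        unfold gMax; exact Nat.findGreatest_spec (P := fun d => pHit A d = true) (Nat.zero_le _) hp0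
      unfold pHit at hg
      obtain ⟨i', hi', hlt', hle'⟩ := of_decide_eq_true hg
      have hgr : (gMax A : Int) ≤ maximumGapBF A := hbd i' (gMax A) hi' hlt' hle'
      omega

lemma bHit_eq_pHit (A : List Int) (d : Nat) : bHit A (d : Int) = pHit A d := by
  unfold bHit pHit
  rw [Bool.eq_iff_iff]
  simp only [List.any_eq_true, PySem.List.mem_pyRange_one, decide_eq_true_eq]
  constructor
  · rintro ⟨x, ⟨hx0, hxlt⟩, hle⟩
    refine ⟨x.toNat, by omega, by omega, ?_⟩
    have h1 : PySem.List.pyGetD A x 0 = A.getD x.toNat 0 := by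
      rw [← PySem.List.pyGetD_natCast A x.toNat 0]; congr 1; omega
    have h2 : PySem.List.pyGetD A (x + (d : Int)) 0 = A.getD (x.toNat + d) 0 := by
      rw [← PySem.List.pyGetD_natCast A (x.toNat + d) 0]; congr 1; push_cast; omega
    rwa [h1, h2] at hle
  · rintro ⟨i, hi, hid, hle⟩
    refine ⟨(i : Int), ⟨by positivity, by omega⟩, ?_⟩
    have h2 : ((i : Int) + (d : Int)) = ((i + d : Nat) : Int) := by push_cast; ring
    rw [PySem.List.pyGetD_natCast, h2, PySem.List.pyGetD_natCast]
    exact hle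

lemma bScan_eq_findGreatest (A : List Int) (b : Nat) :
    bScan A (PySem.List.pyRange (b : Int) 0 (-1)) =
      (Nat.findGreatest (fun d => pHit A d = true) b : Int) := by
  induction b with
  | zero => rw [PySem.List.pyRange_neg_one_eq_nil (by omega)]; simp [bScan]
  | succ b ih =>
    rw [PySem.List.pyRange_neg_one_cons (by exact_mod_cast Nat.succ_pos b)]
    have : ((b : Int) + 1) - 1 = (b : Int) := by ring
    simp only [bScan, Nat.cast_succ, this, ih, Nat.findGreatest_succ]
    have hb : bHit A ((b : Int) + 1) = pHit A (b + 1) := by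
      have := bHit_eq_pHit A (b + 1); push_cast at this; exact this
    rw [hb]
    by_cases h : pHit A (b + 1) = true
    · simp [h]
    · simp [h]

lemma alt_eq_gMax (A : List Int) :
    maximumGapBF_alt A = if A.length = 0 then -1 else (gMax A : Int) := by
  unfold maximumGapBF_alt
  by_cases h : A.length = 0
  · simp [h]
  · have hne : ((A.length : Int)) ≠ 0 := by exact_mod_cast h
    rw [if_neg hne, if_neg h]
    have hcast : (A.length : Int) - 1 = ((A.length - 1 : Nat) : Int) := by
      have : 1 ≤ A.length := Nat.one_le_iff_ne_zero.mpr h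
      push_cast [this]; ring
    rw [hcast, bScan_eq_findGreatest]
    rfl

-- ===== VERDICT (by name: the statement is the Claim_ definition above) =====
theorem maximumGapBF_spec : Claim_equal_maximumGapBF := by
  intro A _
  unfold Spec_maximumGapBF
  rw [maximumGapBF_eq_gMax, alt_eq_gMax]
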